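-- pv_equiv track=rewrite | github.com/wardell894/Project-Euler | oppgave19.py | Die_rata
-- ===== SOURCE A (Python) =====
-- def Die_rata(X):
--     mnd_lengde = [31, 28, 31, 30, 31,30,31, 31,30,31,30,31]
--     mnd_lengde_skuddar = [31, 29, 31, 30, 31,30,31, 31,30,31,30,31]
--     #ant_skuddar  = 0
--     K = X-1900
--     ant_sondager_forste = 0
--     for i in range(1,K+1):
--         if(i%4 == 0):
--             #ant_skuddar+=1
--             Ar = 365*i
--             for L in mnd_lengde_skuddar:
--                 Ar+=L
--                 if(Ar%7 == 6):
--                     ant_sondager_forste+=1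
--
--         if(i%4 != 0):
--             Ar = 365*i
--             for L in mnd_lengde:
--                 Ar+=L
--                 if(Ar%7 == 6):
--                     ant_sondager_forste+=1
--     return ant_sondager_forste
-- ===== SOURCE B (Python) =====
-- def Die_rata(X):
--     # O(1): the per-year count depends only on the year index mod 28
--     # (365*28 is a multiple of 7 and the simplified leap rule i%4==0 has period 4),
--     # so sum one 28-year cycle and multiply.
--     K = X - 1900
--     if K <= 0:
--         return 0
--     mnd_lengde = [31, 28, 31, 30, 31, 30, 31, 31, 30, 31, 30, 31]
--     mnd_lengde_skuddar = [31, 29, 31, 30, 31, 30, 31, 31, 30, 31, 30, 31]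
--
--     def per_year(i):
--         months = mnd_lengde_skuddar if i % 4 == 0 else mnd_lengde
--         d = 365 * i
--         c = 0
--         for L in months:
--             d += L
--             if d % 7 == 6:
--                 c += 1
--         return c
--
--     table = [per_year(i) for i in range(1, 29)]
--     full = K // 28
--     rem = K % 28
--     return full * sum(table) + sum(table[:rem])
-- ===== Notes on version B (the rewrite author's own statement) =====
-- stated objective: faster
-- what changed: Instead of looping over every year from 1901 to X, B exploits that the per-year Sunday count has period 28 (365*28 is a multiple of 7 and the i%4 leap rule has period 4): it sums one precomputed 28-year table once and returns full_cycles*cycle_sum + partial prefix sum.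
import Mathlib
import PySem

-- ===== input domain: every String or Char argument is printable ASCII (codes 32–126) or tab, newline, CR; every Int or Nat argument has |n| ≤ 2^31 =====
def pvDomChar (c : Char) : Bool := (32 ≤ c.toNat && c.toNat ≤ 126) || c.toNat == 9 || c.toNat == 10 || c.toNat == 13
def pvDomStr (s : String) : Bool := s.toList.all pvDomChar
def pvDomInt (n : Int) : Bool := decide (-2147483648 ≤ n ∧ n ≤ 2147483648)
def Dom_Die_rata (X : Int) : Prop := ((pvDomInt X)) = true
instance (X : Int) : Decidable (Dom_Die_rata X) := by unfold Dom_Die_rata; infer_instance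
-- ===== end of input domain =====

-- B replaces A's year-by-year loop with a single 28-year cycle table (O(1) instead of O(X)).

-- ===== PORT A =====
def mndLengde : List Int := [31, 28, 31, 30, 31, 30, 31, 31, 30, 31, 30, 31]
def mndLengdeSkuddar : List Int := [31, 29, 31, 30, 31, 30, 31, 31, 30, 31, 30, 31]

-- the inner 'for L in months: Ar += L; if Ar % 7 == 6: cnt += 1' loop, state (Ar, cnt)
def mndLoop (ms : List Int) (st : Int × Int) : Int × Int :=
  ms.foldl (fun s L =>
    let Ar := s.1 + L
    (Ar, if PySem.Int.mod Ar 7 = 6 then s.2 + 1 else s.2)) st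

def Die_rata (X : Int) : Int :=
  let K := X - 1900
  (PySem.List.pyRange 1 (K + 1) 1).foldl (fun cnt i =>
    if PySem.Int.mod i 4 = 0 then (mndLoop mndLengdeSkuddar (365 * i, cnt)).2
    else (mndLoop mndLengde (365 * i, cnt)).2) 0

-- ===== PORT B =====
-- Source B's per_year helper (same month loop, started at count 0)
def perYear (i : Int) : Int :=
  let months := if PySem.Int.mod i 4 = 0 then mndLengdeSkuddar else mndLengde
  (mndLoop months (365 * i, 0)).2

def Die_rata_alt (X : Int) : Int :=
  let K := X - 1900
  if K ≤ 0 then 0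
  else
    let table := (PySem.List.pyRange 1 29 1).map perYear
    let full := PySem.Int.floordiv K 28
    let rem := PySem.Int.mod K 28
    full * table.sum + (PySem.List.slice table (some 0) (some rem)).sum

-- ===== PRECONDITION & SPEC =====
def Spec_Die_rata (X : Int) (out : Int) : Prop := out = Die_rata_alt X
instance (X : Int) (out : Int) : Decidable (Spec_Die_rata X out) := by unfold Spec_Die_rata; infer_instance

-- ===== CLAIM (what is proved, stated in full; the proofs are below) =====
def Claim_equal_Die_rata : Prop := ∀ (X : Int), Dom_Die_rata X → Spec_Die_rata X (Die_rata X)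

-- ===== LEMMAS AND PROOFS =====

-- pure count of the month loop, for reasoning
def cnt7 : List Int → Int → Int
  | [], _ => 0
  | L :: ms, a => (if PySem.Int.mod (a + L) 7 = 6 then 1 else 0) + cnt7 ms (a + L)

theorem mndLoop_snd (ms : List Int) : ∀ (a c : Int), (mndLoop ms (a, c)).2 = c + cnt7 ms a := by
  induction ms with
  | nil => intro a c; simp [mndLoop, cnt7]
  | cons L ms ih =>
    intro a c
    show (mndLoop ms (a + L, if PySem.Int.mod (a + L) 7 = 6 then c + 1 else c)).2 = _
    rw [ih]
    simp [cnt7]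
    split_ifs <;> ring

theorem cnt7_period (ms : List Int) : ∀ (a t : Int), cnt7 ms (a + 7 * t) = cnt7 ms a := by
  induction ms with
  | nil => intro a t; simp [cnt7]
  | cons L ms ih =>
    intro a t
    have hL : a + 7 * t + L = (a + L) + 7 * t := by ring
    have hm : PySem.Int.mod (a + L + 7 * t) 7 = PySem.Int.mod (a + L) 7 := by
      rw [PySem.Int.mod_eq_emod_of_pos (show (0:Int) < 7 by norm_num),
          PySem.Int.mod_eq_emod_of_pos (show (0:Int) < 7 by norm_num)]
      omega
    simp only [cnt7, hL, hm, ih]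

theorem perYear_eq (i : Int) :
    perYear i = cnt7 (if PySem.Int.mod i 4 = 0 then mndLengdeSkuddar else mndLengde) (365 * i) := by
  unfold perYear
  rw [mndLoop_snd]
  ring

theorem perYear_period (i : Int) : perYear (i + 28) = perYear i := by
  have h4 : PySem.Int.mod (i + 28) 4 = PySem.Int.mod i 4 := by
    rw [PySem.Int.mod_eq_emod_of_pos (show (0:Int) < 4 by norm_num),
        PySem.Int.mod_eq_emod_of_pos (show (0:Int) < 4 by norm_num)]
    omega
  rw [perYear_eq, perYear_eq, h4]
  rw [show (365 : Int) * (i + 28) = 365 * i + 7 * 1460 by ring, cnt7_period]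

-- partial sums of perYear over years 1..n
def gSum (n : Nat) : Int := ((PySem.List.pyRange 1 ((n : Int) + 1) 1).map perYear).sum

theorem gSum_zero : gSum 0 = 0 := by simp [gSum, PySem.List.pyRange_one_eq_nil]

theorem gSum_succ (n : Nat) : gSum (n + 1) = gSum n + perYear ((n : Int) + 1) := by
  unfold gSum
  push_cast
  rw [PySem.List.pyRange_one_succ_right (show (1:Int) ≤ (n : Int) + 1 by omega)]
  simp

theorem gSum_add28 (n : Nat) : gSum (n + 28) = gSum n + gSum 28 := by
  induction n with
  | zero => simp [gSum_zero]
  | succ k ih =>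
    rw [show k + 1 + 28 = (k + 28) + 1 by omega, gSum_succ (k + 28), ih, gSum_succ k]
    rw [show ((k + 28 : Nat) : Int) + 1 = ((k : Int) + 1) + 28 by push_cast; ring,
        perYear_period]
    ring

theorem gSum_decomp (q r : Nat) : gSum (28 * q + r) = (q : Int) * gSum 28 + gSum r := by
  induction q with
  | zero => simp
  | succ k ih =>
    rw [show 28 * (k + 1) + r = (28 * k + r) + 28 by omega, gSum_add28, ih]
    push_cast
    ring

theorem Die_rata_eq_gSum (X : Int) (h : 0 ≤ X - 1900) : Die_rata X = gSum (X - 1900).toNat := by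
  unfold Die_rata gSum
  have hstep : (fun (cnt i : Int) =>
      if PySem.Int.mod i 4 = 0 then (mndLoop mndLengdeSkuddar (365 * i, cnt)).2
      else (mndLoop mndLengde (365 * i, cnt)).2) = fun cnt i => cnt + perYear i := by
    funext cnt i
    simp only [mndLoop_snd, perYear_eq]
    by_cases h4 : PySem.Int.mod i 4 = 0
    · simp only [if_pos h4]
    · simp only [if_neg h4]
  rw [hstep, PySem.List.foldl_add _ perYear, Int.toNat_of_nonneg h]
  exact zero_add _

-- ===== VERDICT (by name: the statement is the Claim_ definition above) =====
theorem Die_rata_spec : Claim_equal_Die_rata := by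
  intro X _
  show Die_rata X = Die_rata_alt X
  simp only [Die_rata_alt]
  by_cases hK : X - 1900 ≤ 0
  · rw [if_pos hK]
    simp only [Die_rata]
    rw [PySem.List.pyRange_one_eq_nil (by omega)]
    rfl
  · rw [if_neg hK]
    have hX0 : (0:Int) ≤ X - 1900 := by omega
    rw [Die_rata_eq_gSum X hX0]
    set n : Nat := (X - 1900).toNat with hn
    have hXn : X - 1900 = (n : Int) := by omega
    set q := n / 28 with hq
    set r := n % 28 with hr28
    have hr : r < 28 := Nat.mod_lt _ (by norm_num)
    have hnqr : n = 28 * q + r := (Nat.div_add_mod n 28).symm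
    have hfull : PySem.Int.floordiv (X - 1900) 28 = (q : Int) := by
      rw [PySem.Int.floordiv_eq_ediv_of_pos (show (0:Int) < 28 by norm_num), hXn]
      omega
    have hrem : PySem.Int.mod (X - 1900) 28 = (r : Int) := by
      rw [PySem.Int.mod_eq_emod_of_pos (show (0:Int) < 28 by norm_num), hXn]
      omega
    rw [hfull, hrem]
    have htake : PySem.List.slice ((PySem.List.pyRange 1 29 1).map perYear) (some 0) (some (r : Int))
        = ((PySem.List.pyRange 1 ((r : Int) + 1) 1).map perYear) := by
      rw [PySem.List.slice_zero_start, PySem.List.slice_to_natCast]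
      rw [PySem.List.pyRange_one 1 29, PySem.List.pyRange_one 1 ((r : Int) + 1)]
      rw [← List.map_take, ← List.map_take, List.take_range,
          show min r ((29:Int) - 1).toNat = (((r:Nat):Int) + 1 - 1).toNat by omega]
    have hcycle : ((PySem.List.pyRange 1 29 1).map perYear).sum = gSum 28 := by
      unfold gSum; norm_num
    rw [htake, hcycle]
    have hgr : ((PySem.List.pyRange 1 ((r : Int) + 1) 1).map perYear).sum = gSum r := rfl
    rw [hgr, hnqr, gSum_decomp]
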